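-- pv_equiv track=rewrite | github.com/joshsmith2/odds_sods | path_checker/path_checker.py | process_paths
-- ===== SOURCE A (Python) =====
-- import itertools
--
-- def lists_equal_to_length_of_shortest(list_a,list_b):
--     """
--     :param list_a, list_b:
--     :return: Boolean
--     """
--     stripped_a = [a for a in list_a if a != '']
--     stripped_b = [b for b in list_b if b != '']
--     zipped = itertools.izip(stripped_a, stripped_b)
--     equal = True
--     for z in zipped:
--         if z[0] != z[1]:
--             equal = False
--     return equal
--
-- def process_paths(lines_from_file):
--     paths = []
--     split_paths = []
--
--     # Split up lines and sort by the length of the path, largest first: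
--     split_lines = [l.split('/') for l in lines_from_file]
--     lines_by_path_length = sorted(split_lines, key=len, reverse=True)
--
--     # Append the longest path to split paths, then see if the others are
--     # subsets of it.
--     try:
--         split_paths.append(lines_by_path_length[0])
--     except IndexError:
--         raise Exception('No paths in input file ')
--
--     for line in lines_by_path_length:
--         append_this_line = True
--         for split_path in split_paths:
--             if lists_equal_to_length_of_shortest(line, split_path):
--                 append_this_line = False
--         if append_this_line:
--             split_paths.append(line)
--     paths = ['/'.join(split_path) for split_path in split_paths]
--     return paths
-- ===== SOURCE B (Python) =====
-- def process_paths(lines_from_file):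
--     split_lines = [l.split('/') for l in lines_from_file]
--     order = sorted(split_lines, key=len, reverse=True)
--
--     # prefix-set trie: `prefixes` holds every prefix of a kept (stripped)
--     # path, `terminals` holds the kept stripped paths themselves.
--     prefixes = set()
--     terminals = set()
--     kept = []
--
--     def insert(line, stripped):
--         kept.append(line)
--         for i in range(len(stripped) + 1):
--             prefixes.add(stripped[:i])
--         terminals.add(stripped)
--
--     first = order[0]
--     insert(first, tuple(c for c in first if c != ''))
--     for line in order:
--         stripped = tuple(c for c in line if c != '')
--         if stripped in prefixes:
--             continue
--         if any(stripped[:i] in terminals for i in range(len(stripped))):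
--             continue
--         insert(line, stripped)
--     return ['/'.join(p) for p in kept]
-- ===== Notes on version B (the rewrite author's own statement) =====
-- stated objective: faster
-- what changed: Replaces A's nested scan that re-compares each line against every kept path component-by-component with hash-set membership tests in a prefix-set/terminal-set (flattened trie) of the kept stripped component sequences.
-- outside the precondition, e.g. on process_paths([]): A raises Exception, B raises IndexError
import Mathlib
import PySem

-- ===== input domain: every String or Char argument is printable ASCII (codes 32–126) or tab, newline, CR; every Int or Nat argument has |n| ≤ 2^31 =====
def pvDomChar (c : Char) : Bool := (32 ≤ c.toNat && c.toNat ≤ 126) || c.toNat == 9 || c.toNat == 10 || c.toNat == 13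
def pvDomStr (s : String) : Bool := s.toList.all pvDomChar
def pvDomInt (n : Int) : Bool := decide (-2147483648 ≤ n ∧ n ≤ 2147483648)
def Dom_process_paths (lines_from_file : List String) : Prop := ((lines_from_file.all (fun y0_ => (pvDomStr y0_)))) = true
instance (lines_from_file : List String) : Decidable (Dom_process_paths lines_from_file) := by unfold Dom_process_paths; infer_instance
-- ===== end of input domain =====

-- B replaces A's quadratic all-pairs stripped-prefix comparison by set lookups in a
-- prefix-set + terminal-set (a flattened trie) keyed by the stripped component sequences.
-- NOTE: A is Python-2 code; it is run (as the test harness runs it) with itertools.izip = zip.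

-- shared primitive wrapper: l.split('/')  ('/' is a fixed nonempty separator, so split? is always some)
def pySplitSlash (s : String) : List String := (PySem.Str.split? s "/").getD []

-- ===== PORT A =====
def lists_equal_to_length_of_shortest (list_a list_b : List String) : Bool :=
  let stripped_a := list_a.filter (fun a => a != "")
  let stripped_b := list_b.filter (fun b => b != "")
  let zipped := List.zip stripped_a stripped_b
  zipped.foldl (fun equal z => if z.1 != z.2 then false else equal) true

def aAppendFlag (split_paths : List (List String)) (line : List String) : Bool :=
  split_paths.foldl
    (fun append_this_line split_path =>
      if lists_equal_to_length_of_shortest line split_path then false else append_this_line)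
    true

def aStep (split_paths : List (List String)) (line : List String) : List (List String) :=
  if aAppendFlag split_paths line then split_paths ++ [line] else split_paths

def process_paths (lines_from_file : List String) : List String :=
  match PySem.List.sorted (lines_from_file.map pySplitSlash) (fun l => l.length) true with
  | [] => []   -- Python raises Exception('No paths in input file ') here; excluded by Pre_
  | first :: rest =>
    ((first :: rest).foldl aStep [first]).map (fun split_path => PySem.Str.join "/" split_path)

-- ===== PORT B =====
def stripSeq (l : List String) : List String := l.filter (fun c => c != "")

-- state: (prefixes, terminals, kept)
def BState : Type := PySem.Set (List String) × PySem.Set (List String) × List (List String)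

def bInsert (st : BState) (line stripped : List String) : BState :=
  ((List.range (stripped.length + 1)).foldl (fun s i => PySem.Set.add s (stripped.take i)) st.1,
   PySem.Set.add st.2.1 stripped,
   st.2.2 ++ [line])

def bStep (st : BState) (line : List String) : BState :=
  let stripped := stripSeq line
  if PySem.Set.contains st.1 stripped then st
  else if (List.range stripped.length).any (fun i => PySem.Set.contains st.2.1 (stripped.take i)) then st
  else bInsert st line stripped

def process_paths_alt (lines_from_file : List String) : List String :=
  match PySem.List.sorted (lines_from_file.map pySplitSlash) (fun l => l.length) true with
  | [] => []   -- Python raises IndexError at order[0]; excluded by Pre_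
  | first :: rest =>
    (((first :: rest).foldl bStep
        (bInsert (PySem.Set.empty, PySem.Set.empty, []) first (stripSeq first))).2.2).map
      (fun p => PySem.Str.join "/" p)

-- ===== PRECONDITION & SPEC =====
-- Pre_ excludes only the empty list, on which the Python A raises Exception('No paths in input file ').
def Pre_process_paths (lines_from_file : List String) : Prop := lines_from_file ≠ []
instance (lines_from_file : List String) : Decidable (Pre_process_paths lines_from_file) := by unfold Pre_process_paths; infer_instance
def pvWitness_process_paths : List String := ["a/b/c", "a/b", "d"]

def Spec_process_paths (lines_from_file : List String) (out : List String) : Prop := out = process_paths_alt lines_from_file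
instance (lines_from_file : List String) (out : List String) : Decidable (Spec_process_paths lines_from_file out) := by unfold Spec_process_paths; infer_instance

-- ===== CLAIM (what is proved, stated in full; the proofs are below) =====
def Claim_equal_process_paths : Prop := ∀ (lines_from_file : List String), Dom_process_paths lines_from_file → Pre_process_paths lines_from_file → Spec_process_paths lines_from_file (process_paths lines_from_file)

-- ===== LEMMAS AND PROOFS =====

-- A's flag fold over kept paths is an 'all' check
theorem foldl_if_false (f : List String → Bool) (l : List (List String)) (b : Bool) :
    l.foldl (fun acc p => if f p then false else acc) b = (b && l.all (fun p => !f p)) := by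
  induction l generalizing b with
  | nil => simp
  | cons x xs ih =>
    simp only [List.foldl_cons, List.all_cons, ih]
    by_cases h : f x = true <;> simp [h]

-- the helper's fold over the zipped pair list
theorem zip_foldl_eq_all (l : List (String × String)) (b : Bool) :
    l.foldl (fun equal z => if z.1 != z.2 then false else equal) b
      = (b && l.all (fun z => z.1 == z.2)) := by
  induction l generalizing b with
  | nil => simp
  | cons x xs ih =>
    simp only [List.foldl_cons, List.all_cons, ih]
    by_cases h : x.1 == x.2 <;>
      simp [h, bne]

theorem zip_all_eq_iff_prefix (a b : List String) :
    (List.zip a b).all (fun z => z.1 == z.2) = true ↔ (a <+: b ∨ b <+: a) := by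
  induction a generalizing b with
  | nil => simp
  | cons x xs ih =>
    cases b with
    | nil => simp
    | cons y ys =>
      rw [List.zip_cons_cons, List.all_cons]
      simp only [Bool.and_eq_true, beq_iff_eq, ih, List.cons_prefix_cons]
      constructor
      · rintro ⟨heq, h | h⟩ <;> subst heq
        · exact Or.inl ⟨rfl, h⟩
        · exact Or.inr ⟨rfl, h⟩
      · rintro (⟨heq, h⟩ | ⟨heq, h⟩) <;> subst heq
        · exact ⟨rfl, Or.inl h⟩
        · exact ⟨rfl, Or.inr h⟩

theorem lists_equal_iff (a b : List String) :
    lists_equal_to_length_of_shortest a b = true ↔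
      (stripSeq a <+: stripSeq b ∨ stripSeq b <+: stripSeq a) := by
  unfold lists_equal_to_length_of_shortest stripSeq
  rw [zip_foldl_eq_all]
  simpa using zip_all_eq_iff_prefix _ _

theorem aAppendFlag_iff (sp : List (List String)) (line : List String) :
    aAppendFlag sp line = true ↔
      ∀ p ∈ sp, ¬ (stripSeq line <+: stripSeq p ∨ stripSeq p <+: stripSeq line) := by
  unfold aAppendFlag
  rw [foldl_if_false]
  simp only [Bool.true_and, List.all_eq_true, Bool.not_eq_true']
  constructor
  · intro h p hp hrel
    exact absurd ((lists_equal_iff line p).mpr hrel) (by simp [h p hp])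
  · intro h p hp
    exact Bool.eq_false_iff.mpr fun ht => h p hp ((lists_equal_iff line p).mp ht)

-- membership in the prefix fold of bInsert
theorem mem_prefix_fold (pr : PySem.Set (List String)) (s0 x : List String) :
    x ∈ (List.range (s0.length + 1)).foldl (fun s i => PySem.Set.add s (s0.take i)) pr ↔
      x ∈ pr ∨ x <+: s0 := by
  rw [← PySem.Set.update_map_eq_foldl_add, PySem.Set.mem_update]
  refine or_congr Iff.rfl ?_
  simp only [List.mem_map, List.mem_range]
  constructor
  · rintro ⟨i, _, rfl⟩
    exact List.take_prefix i s0
  · intro hx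
    exact ⟨x.length, by have := hx.length_le; omega, (List.prefix_iff_eq_take.mp hx).symm⟩

-- the invariant tying A's kept list to B's state
def PathInv (sp : List (List String)) (st : BState) : Prop :=
  st.2.2 = sp ∧
  (∀ x, x ∈ st.1 ↔ ∃ p ∈ sp, x <+: stripSeq p) ∧
  (∀ x, x ∈ st.2.1 ↔ ∃ p ∈ sp, stripSeq p = x)

theorem PathInv_insert (sp : List (List String)) (st : BState) (line : List String)
    (h : PathInv sp st) : PathInv (sp ++ [line]) (bInsert st line (stripSeq line)) := by
  obtain ⟨hk, hpr, htm⟩ := h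
  refine ⟨by simpa [bInsert] using hk, ?_, ?_⟩
  · intro x
    simp only [bInsert, mem_prefix_fold, hpr, List.mem_append, List.mem_singleton]
    constructor
    · rintro (⟨p, hp, hx⟩ | hx)
      · exact ⟨p, Or.inl hp, hx⟩
      · exact ⟨line, Or.inr rfl, hx⟩
    · rintro ⟨p, hp | rfl, hx⟩
      · exact Or.inl ⟨p, hp, hx⟩
      · exact Or.inr hx
  · intro x
    simp only [bInsert, PySem.Set.mem_add, htm, List.mem_append, List.mem_singleton]
    constructor
    · rintro (⟨p, hp, hx⟩ | rfl)
      · exact ⟨p, Or.inl hp, hx⟩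
      · exact ⟨line, Or.inr rfl, rfl⟩
    · rintro ⟨p, hp | rfl, hx⟩
      · exact Or.inl ⟨p, hp, hx⟩
      · exact Or.inr hx.symm

-- B's two tests together detect exactly A's 'some kept path is prefix-comparable'
theorem bDrop_iff (sp : List (List String)) (st : BState) (line : List String) (h : PathInv sp st) :
    (PySem.Set.contains st.1 (stripSeq line)
      || (List.range (stripSeq line).length).any
           (fun i => PySem.Set.contains st.2.1 ((stripSeq line).take i))) = true ↔
    ∃ p ∈ sp, (stripSeq line <+: stripSeq p ∨ stripSeq p <+: stripSeq line) := by
  obtain ⟨-, hpr, htm⟩ := h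
  simp only [Bool.or_eq_true, List.any_eq_true, List.mem_range, PySem.Set.contains_iff, hpr, htm]
  constructor
  · rintro (⟨p, hp, hx⟩ | ⟨i, hi, p, hp, hx⟩)
    · exact ⟨p, hp, Or.inl hx⟩
    · exact ⟨p, hp, Or.inr (hx ▸ List.take_prefix i (stripSeq line))⟩
  · rintro ⟨p, hp, hx | hx⟩
    · exact Or.inl ⟨p, hp, hx⟩
    · by_cases hlen : (stripSeq p).length = (stripSeq line).length
      · have heq : stripSeq p = stripSeq line := hx.eq_of_length hlen
        exact Or.inl ⟨p, hp, by rw [heq]⟩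
      · exact Or.inr ⟨(stripSeq p).length, by have := hx.length_le; omega,
          p, hp, (List.prefix_iff_eq_take.mp hx)⟩

theorem bStep_eq (st : BState) (line : List String) :
    bStep st line =
      if (PySem.Set.contains st.1 (stripSeq line)
            || (List.range (stripSeq line).length).any
                 (fun i => PySem.Set.contains st.2.1 ((stripSeq line).take i)))
      then st else bInsert st line (stripSeq line) := by
  unfold bStep
  cases h1 : PySem.Set.contains st.1 (stripSeq line) <;>
    cases h2 : (List.range (stripSeq line).length).any
        (fun i => PySem.Set.contains st.2.1 ((stripSeq line).take i)) <;>
    simp only [h1, h2, Bool.or_false, Bool.or_true,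
      Bool.false_eq_true, if_true, if_false]

theorem PathInv_step (sp : List (List String)) (st : BState) (line : List String) (h : PathInv sp st) :
    PathInv (aStep sp line) (bStep st line) := by
  rw [bStep_eq]
  unfold aStep
  by_cases hc : (PySem.Set.contains st.1 (stripSeq line)
      || (List.range (stripSeq line).length).any
           (fun i => PySem.Set.contains st.2.1 ((stripSeq line).take i))) = true
  · have hflag : aAppendFlag sp line = false := by
      rw [Bool.eq_false_iff, Ne, aAppendFlag_iff]
      obtain ⟨p, hp, hrel⟩ := (bDrop_iff sp st line h).mp hc
      exact fun hall => hall p hp hrel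
    rw [hc, hflag]
    exact h
  · have hflag : aAppendFlag sp line = true := by
      rw [aAppendFlag_iff]
      intro p hp hrel
      exact hc ((bDrop_iff sp st line h).mpr ⟨p, hp, hrel⟩)
    rw [Bool.not_eq_true] at hc
    rw [hc, hflag]
    exact PathInv_insert sp st line h

theorem PathInv_foldl (l : List (List String)) (sp : List (List String)) (st : BState)
    (h : PathInv sp st) : PathInv (l.foldl aStep sp) (l.foldl bStep st) := by
  induction l generalizing sp st with
  | nil => exact h
  | cons x xs ih => exact ih _ _ (PathInv_step _ _ _ h)

theorem PathInv_init (first : List String) :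
    PathInv [first] (bInsert (PySem.Set.empty, PySem.Set.empty, []) first (stripSeq first)) := by
  refine ⟨rfl, ?_, ?_⟩
  · intro x
    simp [bInsert, mem_prefix_fold, PySem.Set.empty]
  · intro x
    simp [bInsert, PySem.Set.empty, eq_comm]

-- ===== VERDICT (by name: the statement is the Claim_ definition above) =====
theorem process_paths_spec : Claim_equal_process_paths := by
  intro lines hdom hpre
  unfold Spec_process_paths process_paths process_paths_alt
  cases hs : PySem.List.sorted (lines.map pySplitSlash) (fun l => l.length) true with
  | nil => rfl
  | cons first rest =>
    have h := PathInv_foldl (first :: rest) [first]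
      (bInsert (PySem.Set.empty, PySem.Set.empty, []) first (stripSeq first)) (PathInv_init first)
    simp only []
    rw [h.1]
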